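-- pv_equiv track=rewrite | github.com/medrano123/PythonSolutions | HW16/Reducible.py | step_size
-- ===== SOURCE A (Python) =====
-- def step_size(s, const):
--     index = 0
--     path = len(s) - 1
--
--     for i in range(path, -1, -1):
--         letter = ord(s[i]) - 96
--         index = index + (letter * (26 ** i))
--     step = const - (index % const)
--
--     return step
-- ===== SOURCE B (Python) =====
-- def step_size(s, const):
--     acc = 0
--     for ch in reversed(s):
--         acc = (acc * 26 + (ord(ch) - 96)) % const
--     return const - acc
-- ===== Notes on version B (the rewrite author's own statement) =====
-- stated objective: faster
-- what changed: Replaces the sum of letter*26**i big-integer terms (a fresh 26**i power per character) by a single right-to-left Horner pass that reduces modulo const at every step, so no big powers are ever built.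
-- outside the precondition, e.g. on step_size('', 0): A raises ZeroDivisionError, B returns 0
import Mathlib
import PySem

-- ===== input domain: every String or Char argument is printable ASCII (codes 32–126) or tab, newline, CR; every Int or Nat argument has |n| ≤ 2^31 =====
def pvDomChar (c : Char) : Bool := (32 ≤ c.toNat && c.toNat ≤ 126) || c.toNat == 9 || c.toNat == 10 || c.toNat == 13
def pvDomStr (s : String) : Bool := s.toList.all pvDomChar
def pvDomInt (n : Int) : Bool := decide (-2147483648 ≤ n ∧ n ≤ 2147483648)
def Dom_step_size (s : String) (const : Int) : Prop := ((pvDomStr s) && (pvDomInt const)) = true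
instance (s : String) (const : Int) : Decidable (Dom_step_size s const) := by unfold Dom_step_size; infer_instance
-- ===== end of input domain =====

-- B replaces A's per-character 26**i big-integer powers by one right-to-left Horner pass reducing mod const each step (objective: faster; Pre_ excludes const = 0, where A raises ZeroDivisionError).


-- ===== PORT A =====
-- Port of A: sums letter values times 26^i over the descending index range, then takes one mod.
def step_size (s : String) (const : Int) : Int :=
  let index : Int := 0
  let path : Int := PySem.Str.len s - 1
  let index : Int := (PySem.List.pyRange path (-1) (-1)).foldl
    (fun index i =>
      let letter : Int := ((PySem.List.pyGetD s.toList i ' ').toNat : Int) - 96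
      index + letter * 26 ^ i.toNat) index
  let step : Int := const - PySem.Int.mod index const
  step

-- ===== PORT B =====
-- B: one right-to-left Horner pass, reducing modulo const at every step (no big powers).
def step_size_alt (s : String) (const : Int) : Int :=
  let acc : Int := s.toList.reverse.foldl
    (fun acc c => PySem.Int.mod (acc * 26 + ((c.toNat : Int) - 96)) const) 0
  const - acc

-- ===== PRECONDITION & SPEC =====
-- Pre_ excludes const = 0, where Python A raises ZeroDivisionError (index % 0).
def Pre_step_size (s : String) (const : Int) : Prop := const ≠ 0
instance (s : String) (const : Int) : Decidable (Pre_step_size s const) := by unfold Pre_step_size; infer_instance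
def pvWitness_step_size : String × Int := ("abc", 97)
def Spec_step_size (s : String) (const : Int) (out : Int) : Prop := out = step_size_alt s const
instance (s : String) (const : Int) (out : Int) : Decidable (Spec_step_size s const out) := by unfold Spec_step_size; infer_instance

-- ===== CLAIM (what is proved, stated in full; the proofs are below) =====
def Claim_equal_step_size : Prop := ∀ (s : String) (const : Int), Dom_step_size s const → Pre_step_size s const → Spec_step_size s const (step_size s const)

-- ===== LEMMAS AND PROOFS =====

-- letter value of a character, shared shape of both folds
def pvVal (c : Char) : Int := (c.toNat : Int) - 96

theorem pv_mod_zero (c : Int) : PySem.Int.mod 0 c = 0 := by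
  rcases lt_trichotomy c 0 with h | h | h
  · have := PySem.Int.mod_neg_neg 0 (-c)
    simp only [neg_zero, neg_neg] at this
    rw [this, PySem.Int.mod_eq_emod_of_pos (by omega)]
    simp
  · subst h; decide
  · rw [PySem.Int.mod_eq_emod_of_pos h]; simp

theorem pv_modstep_pos {c : Int} (h : 0 < c) (a b : Int) :
    PySem.Int.mod (PySem.Int.mod a c * 26 + b) c = PySem.Int.mod (a * 26 + b) c := by
  simp only [PySem.Int.mod_eq_emod_of_pos h]
  have he : a % c * 26 + b = (a * 26 + b) + c * (-(a / c) * 26) := by rw [Int.emod_def]; ring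
  rw [he, Int.add_mul_emod_self_left]

theorem pv_modstep {c : Int} (hc : c ≠ 0) (a b : Int) :
    PySem.Int.mod (PySem.Int.mod a c * 26 + b) c = PySem.Int.mod (a * 26 + b) c := by
  rcases lt_or_gt_of_ne hc with h | h
  · have hneg : ∀ x : Int, PySem.Int.mod x c = -PySem.Int.mod (-x) (-c) := by
      intro x
      have := PySem.Int.mod_neg_neg (-x) (-c)
      simp only [neg_neg] at this
      omega
    rw [hneg a, hneg (a * 26 + b), hneg (-PySem.Int.mod (-a) (-c) * 26 + b)]
    have h1 : -(-PySem.Int.mod (-a) (-c) * 26 + b) = PySem.Int.mod (-a) (-c) * 26 + -b := by ring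
    have h2 : -(a * 26 + b) = -a * 26 + -b := by ring
    rw [h1, h2, pv_modstep_pos (by omega)]
  · exact pv_modstep_pos h a b

-- the mod-every-step fold equals one mod of the pure Horner fold
theorem pv_fold_mod {c : Int} (hc : c ≠ 0) (l : List Char) : ∀ a : Int,
    l.foldl (fun x ch => PySem.Int.mod (x * 26 + pvVal ch) c) (PySem.Int.mod a c)
      = PySem.Int.mod (l.foldl (fun x ch => x * 26 + pvVal ch) a) c := by
  induction l with
  | nil => intro a; simp
  | cons h t ih =>
    intro a
    simp only [List.foldl_cons, pv_modstep hc]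
    exact ih (a * 26 + pvVal h)

-- the pure Horner fold over the reversed list is the base-26 positional sum
theorem pv_horner (l : List Char) :
    l.reverse.foldl (fun x ch => x * 26 + pvVal ch) 0
      = ((List.range l.length).map (fun k => pvVal (l.getD k ' ') * 26 ^ k)).sum := by
  induction l with
  | nil => simp
  | cons h t ih =>
    simp only [List.reverse_cons, List.foldl_append, List.foldl_cons, List.foldl_nil, ih,
      List.length_cons, List.range_succ_eq_map, List.map_cons, List.map_map, List.sum_cons]
    have : ∀ k : Nat, pvVal ((h :: t).getD (Nat.succ k) ' ') * 26 ^ Nat.succ k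
        = pvVal (t.getD k ' ') * 26 ^ k * 26 := by
      intro k; simp; ring
    simp only [Function.comp_def, this, List.sum_map_mul_right]
    simp [pvVal]
    ring

-- ===== VERDICT (by name: the statement is the Claim_ definition above) =====
theorem step_size_spec : Claim_equal_step_size := by
  intro s const _ hc
  simp only [Spec_step_size, step_size, step_size_alt]
  set l := s.toList with hl
  -- rewrite A's descending range as the reversed ascending range over the indices
  have hrange : PySem.List.pyRange (PySem.Str.len s - 1) (-1) (-1)
      = ((List.range l.length).map (fun k => Int.ofNat k)).reverse := by
    rw [PySem.List.pyRange_neg_one_eq_reverse]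
    have : (-1 : Int) + 1 = 0 := by ring
    rw [this]
    have : PySem.Str.len s - 1 + 1 = (l.length : Int) := by rw [PySem.Str.len_eq]; ring
    rw [this, PySem.List.pyRange_zero_natCast]
    simp
  rw [hrange, PySem.List.foldl_add]
  -- A's sum over indices
  have hmap : (((List.range l.length).map (fun k => Int.ofNat k)).reverse.map
      (fun i => (((PySem.List.pyGetD l i ' ').toNat : Int) - 96) * 26 ^ i.toNat)).sum
      = ((List.range l.length).map (fun k => pvVal (l.getD k ' ') * 26 ^ k)).sum := by
    rw [List.map_reverse, List.sum_reverse, List.map_map]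
    congr 1
    apply List.map_congr_left
    intro k _
    simp [PySem.List.pyGetD_natCast, pvVal]
  rw [hmap]
  -- B's fold
  have hb : l.reverse.foldl (fun acc c => PySem.Int.mod (acc * 26 + ((c.toNat : Int) - 96)) const) 0
      = PySem.Int.mod (((List.range l.length).map (fun k => pvVal (l.getD k ' ') * 26 ^ k)).sum) const := by
    have h0 : (0 : Int) = PySem.Int.mod 0 const := (pv_mod_zero const).symm
    calc l.reverse.foldl (fun acc c => PySem.Int.mod (acc * 26 + ((c.toNat : Int) - 96)) const) 0
        = l.reverse.foldl (fun x ch => PySem.Int.mod (x * 26 + pvVal ch) const) (PySem.Int.mod 0 const) := by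
          rw [← h0]; rfl
      _ = PySem.Int.mod (l.reverse.foldl (fun x ch => x * 26 + pvVal ch) 0) const := pv_fold_mod hc l.reverse 0
      _ = _ := by rw [pv_horner]
  rw [hb]
  simp
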